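-- pv_equiv track=rewrite | github.com/Cho-El/Python-coding-test-practice | 코테기출문제/2023/3.py | solution
-- ===== SOURCE A (Python) =====
-- from collections import deque
--
-- def solution(N, coffee_times):
--     answer = []
--     makingCoffee = []
--     howManyCoffee = len(coffee_times)
--     coffee_times = deque(coffee_times)
--     orderNum = 1
--     # coffee_times 순회
--     while True:
--         # 커피 추출구에 배정
--         while coffee_times:
--             # 커피 추출구를 다쓰면 break
--             if len(makingCoffee) == N:
--                 break
--             time = coffee_times.popleft()
--             makingCoffee.append([time,orderNum])
--             orderNum += 1
--
--         makingCoffee.sort()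
--         endTime, endNum = makingCoffee.pop(0)
--         answer.append(endNum)
--
--         leaveCoffeeNum = len(makingCoffee)
--         i = 0
--         # 완료까지 남은 커피들 계산
--         while i < leaveCoffeeNum:
--             leaveTime, leaveNum = makingCoffee.pop(0)
--             leaveTime -= endTime
--             if leaveTime == 0:
--                 answer.append(leaveNum)
--             else:
--                 makingCoffee.append([leaveTime, leaveNum])
--             i += 1
--
--         if len(answer) == howManyCoffee:
--             break
--
--     return answer
-- ===== SOURCE B (Python) =====
-- def solution(N, coffee_times):
--     # absolute completion times in a list kept sorted by (completion, order);
--     # no per-round re-sort and no countdown subtraction pass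
--     M = len(coffee_times)
--     answer = []
--     running = []          # (absolute completion time, order number), kept sorted
--     clock = 0
--     i = 0
--     while len(answer) < M:
--         # assign waiting coffees to free machines
--         while i < M and len(running) < N:
--             item = (clock + coffee_times[i], i + 1)
--             j = 0
--             while j < len(running) and running[j] < item:
--                 j += 1
--             running.insert(j, item)
--             i += 1
--         clock = running[0][0]
--         while running and running[0][0] == clock:
--             answer.append(running.pop(0)[1])
--     return answer
-- ===== Notes on version B (the rewrite author's own statement) =====
-- stated objective: alternative
-- what changed: B replaces A's per-round full re-sort of relative countdown times (sort, pop, subtract-and-rebuild pass over every running coffee each round) by a single sorted list of absolute completion times maintained with incremental sorted insertion, popping the equal-completion prefix each round; Pre_ restricts to the natural domain N >= 1 and a nonempty order list (A raises on empty input and on N = 0, and for negative N A's full-machine check never fires so it accidentally behaves as infinitely many machines, where B raises).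
-- outside the precondition, e.g. on solution(-1, [3, 1, 2]): A returns [2, 3, 1], B raises IndexError
import Mathlib
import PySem

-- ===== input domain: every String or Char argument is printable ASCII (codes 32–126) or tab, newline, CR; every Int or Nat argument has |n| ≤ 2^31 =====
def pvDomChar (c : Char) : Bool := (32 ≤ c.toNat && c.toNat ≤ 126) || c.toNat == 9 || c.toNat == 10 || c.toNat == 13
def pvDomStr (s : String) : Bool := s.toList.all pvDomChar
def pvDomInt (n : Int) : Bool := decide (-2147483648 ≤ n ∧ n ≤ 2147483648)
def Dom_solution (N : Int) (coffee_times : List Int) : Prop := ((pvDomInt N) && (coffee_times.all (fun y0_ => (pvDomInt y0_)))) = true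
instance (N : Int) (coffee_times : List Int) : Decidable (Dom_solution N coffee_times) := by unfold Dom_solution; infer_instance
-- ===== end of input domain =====

-- B keeps one sorted list of absolute completion times (incremental insertion) instead of
-- A's per-round re-sort of relative countdowns with a subtract-and-rebuild pass; return
-- values agree on the natural domain (N ≥ 1, nonempty list) stated in Pre_solution.

-- ===== PORT A =====
-- inner fill loop: `while coffee_times: if len(makingCoffee) == N: break; popleft; append`
def aFill (N : Int) (q : List Int) (making : List (Int × Int)) (orderNum : Int) :
    List Int × List (Int × Int) × Int :=
  match q with
  | [] => ([], making, orderNum)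
  | t :: rest =>
    if (making.length : Int) = N then (t :: rest, making, orderNum)
    else aFill N rest (making ++ [(t, orderNum)]) (orderNum + 1)

-- outer `while True` loop; fuel only bounds the number of rounds (each round appends at
-- least one element to answer, so coffee_times.length + 1 always suffices on Pre_).
-- makingCoffee holds [time, orderNum] pairs; Python's list sort on them is the
-- lexicographic (time, orderNum) sort, ported with PySem.List.sorted2.
def aLoop (N : Int) (fuel : Nat) (q : List Int) (making : List (Int × Int))
    (answer : List Int) (orderNum : Int) (howMany : Nat) : List Int :=
  match fuel with
  | 0 => answer
  | fuel + 1 =>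
    match aFill N q making orderNum with
    | (q, making, orderNum) =>
      match PySem.List.sorted2 making (fun p => p.1) (fun p => p.2) with
      | [] => answer   -- Python raises IndexError here (pop from empty list); outside Pre_
      | (endTime, endNum) :: rest =>
        match rest.foldl
            (fun (acc : List Int × List (Int × Int)) p =>
              if p.1 - endTime = 0 then (acc.1 ++ [p.2], acc.2)
              else (acc.1, acc.2 ++ [(p.1 - endTime, p.2)]))
            (answer ++ [endNum], ([] : List (Int × Int))) with
        | (answer, making) =>
          if answer.length = howMany then answer
          else aLoop N fuel q making answer orderNum howMany

def solution (N : Int) (coffee_times : List Int) : List Int :=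
  aLoop N (coffee_times.length + 1) coffee_times [] [] 1 coffee_times.length

-- ===== PORT B =====
-- `while j < len(running) and running[j] < item: j += 1; running.insert(j, item)`:
-- linear scan to the insertion point (Python tuple `<` is the lexicographic order)
def bInsert (item : Int × Int) (rs : List (Int × Int)) : List (Int × Int) :=
  match rs with
  | [] => [item]
  | r :: rest =>
    if r.1 < item.1 ∨ (r.1 = item.1 ∧ r.2 < item.2) then r :: bInsert item rest
    else item :: r :: rest

-- `while i < M and len(running) < N: ... i += 1`
def bFill (N : Int) (ts : List Int) (clock : Int) (i : Nat)
    (running : List (Int × Int)) : Nat × List (Int × Int) :=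
  if h : i < ts.length ∧ (running.length : Int) < N then
    bFill N ts clock (i + 1) (bInsert (clock + ts[i]'h.1, (i : Int) + 1) running)
  else (i, running)
termination_by ts.length - i
decreasing_by exact Nat.sub_lt_sub_left h.1 (Nat.lt_succ_self i)

-- `while running and running[0][0] == clock: answer.append(running.pop(0)[1])`
def bPop (clock : Int) (running : List (Int × Int)) (answer : List Int) :
    List (Int × Int) × List Int :=
  match running with
  | [] => ([], answer)
  | r :: rest =>
    if r.1 = clock then bPop clock rest (answer ++ [r.2])
    else (r :: rest, answer)

-- `while len(answer) < M`; fuel bounds the rounds exactly as in aLoop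
def bLoop (N : Int) (fuel : Nat) (ts : List Int) (i : Nat)
    (running : List (Int × Int)) (answer : List Int) (clock : Int) : List Int :=
  match fuel with
  | 0 => answer
  | fuel + 1 =>
    if answer.length < ts.length then
      match bFill N ts clock i running with
      | (i, running) =>
        match running with
        | [] => answer  -- Python raises IndexError on running[0]; outside Pre_
        | r :: rest =>
          match bPop r.1 (r :: rest) answer with
          | (running, answer) => bLoop N fuel ts i running answer r.1
    else answer

def solution_alt (N : Int) (coffee_times : List Int) : List Int :=
  bLoop N (coffee_times.length + 1) coffee_times 0 [] [] 0

-- ===== PRECONDITION & SPEC =====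
-- Pre_ restricts to the task's natural domain: at least one machine and a nonempty order
-- list. It excludes inputs A still returns on only for N < 0 (nonempty list), where A's
-- full-machine test `len(makingCoffee) == N` can never fire, so A accidentally behaves as
-- if there were infinitely many machines while B raises IndexError; A itself raises
-- IndexError on an empty list and on N = 0 with a nonempty list.
def Pre_solution (N : Int) (coffee_times : List Int) : Prop := 1 ≤ N ∧ coffee_times ≠ []
instance (N : Int) (coffee_times : List Int) : Decidable (Pre_solution N coffee_times) := by
  unfold Pre_solution; infer_instance
def pvWitness_solution : Int × List Int := (2, [4, 2, 2])

def Spec_solution (N : Int) (coffee_times : List Int) (out : List Int) : Prop := out = solution_alt N coffee_times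
instance (N : Int) (coffee_times : List Int) (out : List Int) : Decidable (Spec_solution N coffee_times out) := by unfold Spec_solution; infer_instance

-- ===== CLAIM (what is proved, stated in full; the proofs are below) =====
def Claim_equal_solution : Prop := ∀ (N : Int) (coffee_times : List Int), Dom_solution N coffee_times → Pre_solution N coffee_times → Spec_solution N coffee_times (solution N coffee_times)

-- ===== LEMMAS AND PROOFS =====

-- Python's tuple `<` on (Int, Int): the strict lexicographic order
def pltP (a b : Int × Int) : Prop := a.1 < b.1 ∨ (a.1 = b.1 ∧ a.2 < b.2)

-- relative (countdown) view of a list of absolute completion times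
def shiftL (c : Int) (rs : List (Int × Int)) : List (Int × Int) :=
  rs.map (fun p => (p.1 - c, p.2))

-- number of coffees a fill loop assigns
def fillK (N : Int) (qlen mlen : Nat) : Nat := min qlen (N - (mlen : Int)).toNat

-- the coffees assigned by a fill starting at index i (relative times, order numbers)
def newItems (ts : List Int) (i k : Nat) : List (Int × Int) :=
  (List.range k).map (fun j => (ts.getD (i + j) 0, (i : Int) + (j : Int) + 1))

lemma sorted2_eq_lex (xs : List (Int × Int)) :
    PySem.List.sorted2 xs (fun p => p.1) (fun p => p.2)
      = PySem.List.sorted xs (fun p => toLex (p.1, p.2)) := by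
  have hb : (fun (a b : Int × Int) =>
        decide (a.1 < b.1) || (!decide (b.1 < a.1) && decide (a.2 < b.2)))
      = (fun (a b : Int × Int) => decide (toLex (a.1, a.2) < toLex (b.1, b.2))) := by
    funext a b
    by_cases h1 : a.1 < b.1 <;> by_cases h2 : b.1 < a.1 <;> by_cases h3 : a.2 < b.2 <;>
      simp [h1, h2, h3, Prod.Lex.lt_iff] <;> omega
  simp only [PySem.List.sorted2, PySem.List.sorted, hb, Bool.false_eq_true, if_false]

lemma sorted2_unique (xs ys : List (Int × Int)) (hp : ys.Perm xs)
    (hs : ys.Pairwise pltP) :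
    PySem.List.sorted2 xs (fun p => p.1) (fun p => p.2) = ys := by
  rw [sorted2_eq_lex]
  refine PySem.List.sorted_eq_of_perm_of_pairwise_lt xs ys _ hp ?_
  refine hs.imp ?_
  intro a b hab
  rw [Prod.Lex.lt_iff]
  exact hab

lemma bInsert_perm (item : Int × Int) (rs : List (Int × Int)) :
    (bInsert item rs).Perm (item :: rs) := by
  induction rs with
  | nil => simp [bInsert]
  | cons r rest ih =>
    simp only [bInsert]
    split
    · exact (ih.cons r).trans (List.Perm.swap item r rest)
    · exact List.Perm.refl _

lemma bInsert_pairwise (item : Int × Int) (rs : List (Int × Int))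
    (h : rs.Pairwise pltP) (hf : ∀ r ∈ rs, r.2 ≠ item.2) :
    (bInsert item rs).Pairwise pltP := by
  induction rs with
  | nil => simp [bInsert]
  | cons r rest ih =>
    rcases List.pairwise_cons.mp h with ⟨hr, hrest⟩
    simp only [bInsert]
    split
    · rename_i hlt
      refine List.pairwise_cons.mpr ⟨?_, ih hrest (fun x hx => hf x (List.mem_cons_of_mem r hx))⟩
      intro x hx
      rcases List.mem_cons.mp ((bInsert_perm item rest).mem_iff.mp hx) with h' | h'
      · subst h'; exact hlt
      · exact hr x h'
    · rename_i hnlt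
      have hne : r.2 ≠ item.2 := hf r (List.mem_cons_self)
      have hir : pltP item r := by simp only [pltP] at hnlt ⊢; omega
      refine List.pairwise_cons.mpr ⟨?_, h⟩
      intro x hx
      rcases List.mem_cons.mp hx with h' | h'
      · subst h'; exact hir
      · have := hr x h'
        simp only [pltP] at hir this ⊢; omega

lemma foldl_bInsert_perm (f : Int × Int → Int × Int) (items acc : List (Int × Int)) :
    (items.foldl (fun a p => bInsert (f p) a) acc).Perm (acc ++ items.map f) := by
  induction items generalizing acc with
  | nil => simp
  | cons q rest ih =>
    simp only [List.foldl_cons, List.map_cons]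
    refine (ih (bInsert (f q) acc)).trans ?_
    refine (List.Perm.append_right (rest.map f) (bInsert_perm (f q) acc)).trans ?_
    exact List.perm_middle.symm

lemma foldl_bInsert_pairwise (f : Int × Int → Int × Int)
    (hf : ∀ p, (f p).2 = p.2) (items acc : List (Int × Int))
    (ha : acc.Pairwise pltP)
    (hlt : ∀ p ∈ acc, ∀ q ∈ items, p.2 < q.2)
    (hi : items.Pairwise (fun a b => a.2 < b.2)) :
    (items.foldl (fun a p => bInsert (f p) a) acc).Pairwise pltP := by
  induction items generalizing acc with
  | nil => exact ha
  | cons q rest ih =>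
    rcases List.pairwise_cons.mp hi with ⟨hq, hrest⟩
    simp only [List.foldl_cons]
    refine ih (bInsert (f q) acc) ?_ ?_ hrest
    · refine bInsert_pairwise (f q) acc ha ?_
      intro r hr
      have := hlt r hr q List.mem_cons_self
      rw [hf q]; omega
    · intro p hp x hx
      rcases List.mem_cons.mp ((bInsert_perm (f q) acc).mem_iff.mp hp) with h' | h'
      · subst h'; rw [hf q]; exact hq x hx
      · exact hlt p h' x (List.mem_cons_of_mem q hx)

lemma newItems_succ (ts : List Int) (i k : Nat) :
    newItems ts i (k + 1) = (ts.getD i 0, (i : Int) + 1) :: newItems ts (i + 1) k := by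
  simp only [newItems, List.range_succ_eq_map, List.map_cons, List.map_map]
  refine congrArg₂ List.cons (by norm_num) ?_
  refine List.map_congr_left ?_
  intro j hj
  simp only [Function.comp_apply, Nat.succ_eq_add_one]
  refine congrArg₂ Prod.mk (by congr 1; omega) (by push_cast; ring)

lemma aFill_spec (N : Int) : ∀ (q : List Int) (making : List (Int × Int)) (ord : Int),
    (making.length : Int) ≤ N →
    aFill N q making ord
      = (q.drop (fillK N q.length making.length),
         making ++ (List.range (fillK N q.length making.length)).map
           (fun j => (q.getD j 0, ord + (j : Int))),
         ord + (fillK N q.length making.length : Int)) := by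
  intro q
  induction q with
  | nil =>
    intro making ord h
    have hK : fillK N 0 making.length = 0 := by
      simp [fillK]
    simp [aFill, hK]
  | cons t rest ih =>
    intro making ord h
    by_cases hm : (making.length : Int) = N
    · have hK : fillK N (rest.length + 1) making.length = 0 := by
        simp only [fillK]; omega
      simp [aFill, hm, hK]
    · have h' : (((making ++ [(t, ord)]).length : Nat) : Int) ≤ N := by
        simp only [List.length_append, List.length_cons, List.length_nil]
        push_cast; omega
      have hK : fillK N (rest.length + 1) making.length
          = fillK N rest.length (making.length + 1) + 1 := by
        simp only [fillK]
        push_cast; omega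
      simp only [aFill, if_neg hm]
      rw [ih (making ++ [(t, ord)]) (ord + 1) h']
      simp only [List.length_append, List.length_cons, List.length_nil]
      rw [hK]
      refine congrArg₂ Prod.mk (by simp [List.drop_succ_cons]) ?_
      refine congrArg₂ Prod.mk ?_ (by push_cast; ring)
      rw [List.range_succ_eq_map]
      simp only [List.map_cons, List.map_map, List.getD_cons_zero, List.append_assoc,
        List.cons_append, List.nil_append, Nat.cast_zero, add_zero]
      refine congrArg (making ++ ·) (congrArg₂ List.cons rfl ?_)
      refine List.map_congr_left ?_
      intro j hj
      simp only [Function.comp_apply, Nat.succ_eq_add_one, List.getD_cons_succ]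
      refine congrArg₂ Prod.mk rfl (by push_cast; ring)

lemma bFill_spec (N : Int) (ts : List Int) (clock : Int) :
    ∀ (i : Nat) (running : List (Int × Int)), (running.length : Int) ≤ N →
    bFill N ts clock i running
      = (i + fillK N (ts.length - i) running.length,
         (newItems ts i (fillK N (ts.length - i) running.length)).foldl
           (fun acc p => bInsert (clock + p.1, p.2) acc) running) := by
  suffices H : ∀ (k i : Nat) (running : List (Int × Int)), (running.length : Int) ≤ N →
      k = fillK N (ts.length - i) running.length →
      bFill N ts clock i running
        = (i + k, (newItems ts i k).foldl (fun acc p => bInsert (clock + p.1, p.2) acc) running) by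
    intro i running h
    exact H _ i running h rfl
  intro k
  induction k with
  | zero =>
    intro i running h hk
    have hcond : ¬ (i < ts.length ∧ (running.length : Int) < N) := by
      simp only [fillK] at hk
      omega
    rw [bFill, dif_neg hcond]
    simp [newItems]
  | succ k ih =>
    intro i running h hk
    have hcond : i < ts.length ∧ (running.length : Int) < N := by
      simp only [fillK] at hk
      constructor <;> omega
    rw [bFill, dif_pos hcond]
    have hlen : (((bInsert (clock + ts[i]'hcond.1, (i : Int) + 1) running).length : Nat) : Int) ≤ N := by
      have := (bInsert_perm (clock + ts[i]'hcond.1, (i : Int) + 1) running).length_eq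
      simp only [this, List.length_cons]
      push_cast; omega
    have hk' : k = fillK N (ts.length - (i + 1))
        (bInsert (clock + ts[i]'hcond.1, (i : Int) + 1) running).length := by
      have := (bInsert_perm (clock + ts[i]'hcond.1, (i : Int) + 1) running).length_eq
      simp only [this, List.length_cons]
      simp only [fillK] at hk ⊢
      omega
    rw [ih (i + 1) _ hlen hk']
    refine congrArg₂ Prod.mk (by omega) ?_
    rw [newItems_succ]
    simp only [List.foldl_cons]
    congr 2
    rw [List.getD_eq_getElem ts 0 hcond.1]

lemma bPop_spec (c : Int) : ∀ (rs : List (Int × Int)) (ans : List Int),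
    bPop c rs ans = (rs.dropWhile (fun r => decide (r.1 = c)),
                     ans ++ (rs.takeWhile (fun r => decide (r.1 = c))).map Prod.snd) := by
  intro rs
  induction rs with
  | nil => intro ans; simp [bPop]
  | cons r rest ih =>
    intro ans
    simp only [bPop, List.takeWhile_cons, List.dropWhile_cons]
    by_cases h : r.1 = c
    · simp [h, ih]
    · simp [h]

lemma afold_spec (e : Int) : ∀ (l : List (Int × Int)) (ans : List Int) (mk : List (Int × Int)),
    l.foldl (fun (acc : List Int × List (Int × Int)) p =>
        if p.1 - e = 0 then (acc.1 ++ [p.2], acc.2)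
        else (acc.1, acc.2 ++ [(p.1 - e, p.2)])) (ans, mk)
      = (ans ++ (l.filter (fun p => decide (p.1 = e))).map Prod.snd,
         mk ++ (l.filter (fun p => !decide (p.1 = e))).map (fun p => (p.1 - e, p.2))) := by
  intro l
  induction l with
  | nil => intro ans mk; simp
  | cons p rest ih =>
    intro ans mk
    simp only [List.foldl_cons, List.filter_cons]
    by_cases h : p.1 = e
    · have h0 : p.1 - e = 0 := by omega
      simp [h, ih]
    · have h0 : ¬ p.1 - e = 0 := by omega
      simp [h, h0, ih]

lemma filter_eq_takeWhile (e : Int) : ∀ (l : List (Int × Int)),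
    l.Pairwise (fun a b => a.1 ≤ b.1) → (∀ p ∈ l, e ≤ p.1) →
    l.filter (fun p => decide (p.1 = e)) = l.takeWhile (fun p => decide (p.1 = e)) ∧
    l.filter (fun p => !decide (p.1 = e)) = l.dropWhile (fun p => decide (p.1 = e)) := by
  intro l
  induction l with
  | nil => simp
  | cons p rest ih =>
    intro hp hlb
    rcases List.pairwise_cons.mp hp with ⟨hhead, htail⟩
    by_cases h : p.1 = e
    · have := ih htail (fun q hq => hlb q (List.mem_cons_of_mem p hq))
      simp [h, this]
    · have hgt : ∀ q ∈ rest, ¬ q.1 = e := by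
        intro q hq
        have h1 := hhead q hq
        have h2 := hlb p List.mem_cons_self
        omega
      have hd : (decide (p.1 = e)) = false := by simp [h]
      refine ⟨?_, ?_⟩
      · simp only [List.filter_cons, List.takeWhile_cons, hd, Bool.false_eq_true, if_false]
        simp only [List.filter_eq_nil_iff]
        intro q hq; simpa using hgt q hq
      · simp only [List.filter_cons, List.dropWhile_cons, hd, Bool.not_false, if_true,
          Bool.false_eq_true, if_false]
        congr 1
        rw [List.filter_eq_self]
        intro q hq; simpa using hgt q hq

lemma loop_sim (N : Int) (ts : List Int) (hN : 1 ≤ N) :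
    ∀ (fuel : Nat) (i : Nat) (running : List (Int × Int)) (answer : List Int) (clock : Int),
    i ≤ ts.length →
    running.Pairwise pltP →
    (∀ p ∈ running, p.2 < (i : Int) + 1) →
    (running.length : Int) ≤ N →
    answer.length + running.length = i →
    answer.length < ts.length →
    ts.length < answer.length + fuel →
    aLoop N fuel (ts.drop i) (shiftL clock running) answer ((i : Int) + 1) ts.length
      = bLoop N fuel ts i running answer clock := by
  intro fuel
  induction fuel with
  | zero =>
    intro i running answer clock _ _ _ _ _ hlt hfuel
    omega
  | succ fuel ih =>
    intro i running answer clock hi hpw hnum hlen hcount hlt hfuel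
    obtain ⟨k, hk⟩ : ∃ k, fillK N (ts.length - i) running.length = k := ⟨_, rfl⟩
    have hkle : k ≤ ts.length - i ∧ (running.length : Int) + k ≤ N := by
      simp only [fillK] at hk; omega
    -- the new coffees and the filled running list
    obtain ⟨items, hit⟩ : ∃ it, newItems ts i k = it := ⟨_, rfl⟩
    obtain ⟨running', hrun'⟩ :
        ∃ r, items.foldl (fun acc p => bInsert (clock + p.1, p.2) acc) running = r := ⟨_, rfl⟩
    have hitems_len : items.length = k := by simp [← hit, newItems]
    have hitems_mem : ∀ q ∈ items, ∃ j : Nat, j < k ∧ q.2 = (i : Int) + (j : Int) + 1 := by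
      intro q hq
      simp only [← hit, newItems, List.mem_map, List.mem_range] at hq
      obtain ⟨j, hj, rfl⟩ := hq
      exact ⟨j, hj, rfl⟩
    have hitems_pw : items.Pairwise (fun a b => a.2 < b.2) := by
      rw [← hit]
      exact List.Pairwise.map _ (fun a b hab => by push_cast; omega) List.pairwise_lt_range
    have hperm : running'.Perm (running ++ items.map (fun p => (clock + p.1, p.2))) := by
      rw [← hrun']
      exact foldl_bInsert_perm _ items running
    have hpw' : running'.Pairwise pltP := by
      rw [← hrun']
      refine foldl_bInsert_pairwise (fun p => (clock + p.1, p.2)) (fun p => rfl) items running hpw ?_ hitems_pw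
      intro p hp q hq
      obtain ⟨j, hj, hq2⟩ := hitems_mem q hq
      have := hnum p hp
      omega
    have hshift_items : shiftL clock (items.map (fun p => (clock + p.1, p.2))) = items := by
      simp only [shiftL, List.map_map]
      have hid : ((fun p : Int × Int => (p.1 - clock, p.2)) ∘ (fun p : Int × Int => (clock + p.1, p.2))) = id := by
        funext p
        simp only [Function.comp_apply, id_eq]
        rw [show clock + p.1 - clock = p.1 by ring]
      rw [hid, List.map_id]
    have hms : PySem.List.sorted2 (shiftL clock running ++ items) (fun p => p.1) (fun p => p.2)
        = shiftL clock running' := by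
      refine sorted2_unique _ _ ?_ ?_
      · have h1 := hperm.map (fun p : Int × Int => (p.1 - clock, p.2))
        have h2 : shiftL clock (running ++ items.map (fun p => (clock + p.1, p.2)))
            = shiftL clock running ++ items := by
          simp only [shiftL] at hshift_items ⊢
          rw [List.map_append, hshift_items]
        simp only [shiftL] at h1 h2 ⊢
        rw [← h2]
        exact h1
      · exact List.Pairwise.map _ (fun a b hab => by simp only [pltP] at hab ⊢; omega) hpw'
    have hlenr' : running'.length = running.length + k := by
      rw [hperm.length_eq]
      simp [hitems_len]
    have hne : running' ≠ [] := by
      intro h0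
      rw [h0] at hlenr'
      simp only [List.length_nil] at hlenr'
      simp only [fillK] at hk
      omega
    obtain ⟨r0, rtail, hr⟩ : ∃ r0 rtail, running' = r0 :: rtail := by
      cases hrc : running' with
      | nil => exact absurd hrc hne
      | cons a b => exact ⟨a, b, rfl⟩
    have hpwcons := List.pairwise_cons.mp (hr ▸ hpw')
    have hhead : ∀ q ∈ rtail, pltP r0 q := hpwcons.1
    have htailpw : rtail.Pairwise pltP := hpwcons.2
    have hfstle : rtail.Pairwise (fun a b => a.1 ≤ b.1) :=
      htailpw.imp (by intro a b hab; simp only [pltP] at hab; omega)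
    have hlb : ∀ q ∈ rtail, r0.1 ≤ q.1 := by
      intro q hq
      have := hhead q hq
      simp only [pltP] at this
      omega
    -- the A-side fill, in closed form
    have hAfill : aFill N (ts.drop i) (shiftL clock running) ((i : Int) + 1)
        = (ts.drop (i + k), shiftL clock running ++ items, (i : Int) + 1 + (k : Int)) := by
      rw [aFill_spec N (ts.drop i) (shiftL clock running) ((i : Int) + 1)
        (by simp only [shiftL, List.length_map]; exact hlen)]
      have hlen2 : (shiftL clock running).length = running.length := by simp [shiftL]
      rw [hlen2, List.length_drop, hk]
      refine congrArg₂ Prod.mk ?_ (congrArg₂ Prod.mk ?_ rfl)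
      · rw [List.drop_drop, Nat.add_comm]
      · refine congrArg (shiftL clock running ++ ·) ?_
        rw [← hit]
        simp only [newItems]
        refine List.map_congr_left ?_
        intro j hj
        refine congrArg₂ Prod.mk ?_ (by ring)
        simp [List.getD_eq_getElem?_getD, List.getElem?_drop]
    have hBfill : bFill N ts clock i running = (i + k, running') := by
      rw [bFill_spec N ts clock i running hlen, hk, hit, hrun']
    -- filters of the shifted tail
    have hfmap1 : (shiftL clock rtail).filter (fun p => decide (p.1 = r0.1 - clock))
        = (rtail.filter (fun q => decide (q.1 = r0.1))).map (fun p => (p.1 - clock, p.2)) := by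
      simp only [shiftL, List.filter_map]
      congr 1
      apply List.filter_congr
      intro q hq
      simp only [Function.comp_apply]
      exact decide_eq_decide.mpr (by constructor <;> intro <;> omega)
    have hfmap2 : (shiftL clock rtail).filter (fun p => !decide (p.1 = r0.1 - clock))
        = (rtail.filter (fun q => !decide (q.1 = r0.1))).map (fun p => (p.1 - clock, p.2)) := by
      simp only [shiftL, List.filter_map]
      congr 1
      apply List.filter_congr
      intro q hq
      simp only [Function.comp_apply]
      congr 1
      exact decide_eq_decide.mpr (by constructor <;> intro <;> omega)
    have hftw := filter_eq_takeWhile r0.1 rtail hfstle hlb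
    -- unfold one round on each side
    rw [aLoop, bLoop, if_pos hlt, hAfill, hBfill]
    try dsimp only
    rw [hms, hr]
    rw [show shiftL clock (r0 :: rtail) = (r0.1 - clock, r0.2) :: shiftL clock rtail from rfl]
    try dsimp only
    rw [afold_spec]
    try dsimp only
    rw [bPop_spec]
    simp only [List.takeWhile_cons, List.dropWhile_cons, decide_eq_true_eq,
      if_true, List.map_cons]
    rw [hfmap1, hfmap2, hftw.1, hftw.2]
    have hsnd : ∀ (l : List (Int × Int)),
        (l.map (fun p : Int × Int => (p.1 - clock, p.2))).map Prod.snd = l.map Prod.snd := by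
      intro l
      rw [List.map_map]
      rfl
    rw [hsnd]
    have hmk : ((rtail.dropWhile (fun q => decide (q.1 = r0.1))).map
          (fun p : Int × Int => (p.1 - clock, p.2))).map
          (fun p : Int × Int => (p.1 - (r0.1 - clock), p.2))
        = shiftL r0.1 (rtail.dropWhile (fun q => decide (q.1 = r0.1))) := by
      rw [List.map_map]
      simp only [shiftL]
      refine List.map_congr_left ?_
      intro p hp
      simp only [Function.comp_apply]
      refine congrArg₂ Prod.mk (by ring) rfl
    rw [hmk]
    have hlentw := congrArg List.length
      (List.takeWhile_append_dropWhile (p := fun q => decide (q.1 = r0.1)) (l := rtail))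
    simp only [List.length_append] at hlentw
    have hrtlen : rtail.length + 1 = running.length + k := by
      have := hlenr'
      rw [hr] at this
      simpa using this
    have hA1len : (answer ++ [r0.2] ++
          ((rtail.takeWhile (fun q => decide (q.1 = r0.1))).map Prod.snd)).length
        + (rtail.dropWhile (fun q => decide (q.1 = r0.1))).length = i + k := by
      simp only [List.length_append, List.length_map, List.length_cons, List.length_nil]
      omega
    have happ : answer ++ [r0.2] ++ ((rtail.takeWhile (fun q => decide (q.1 = r0.1))).map Prod.snd)
        = answer ++ r0.2 :: ((rtail.takeWhile (fun q => decide (q.1 = r0.1))).map Prod.snd) := by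
      simp [List.append_assoc]
    by_cases hdone : (answer ++ r0.2 :: ((rtail.takeWhile (fun q => decide (q.1 = r0.1))).map Prod.snd)).length = ts.length
    · rw [happ, if_pos hdone]
      cases fuel with
      | zero => omega
      | succ f =>
        rw [bLoop, if_neg (by omega)]
    · rw [happ, if_neg hdone]
      have harr : (i : Int) + 1 + (k : Int) = ((i + k : Nat) : Int) + 1 := by push_cast; ring
      rw [harr]
      refine ih (i + k) _ _ r0.1 ?_ ?_ ?_ ?_ ?_ ?_ ?_
      · omega
      · exact List.Pairwise.sublist (List.dropWhile_sublist _) htailpw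
      · intro p hp
        have hp1 : p ∈ rtail := (List.dropWhile_sublist _).subset hp
        have hp2 : p ∈ running' := by rw [hr]; exact List.mem_cons_of_mem _ hp1
        rcases List.mem_append.mp (hperm.mem_iff.mp hp2) with h' | h'
        · have := hnum p h'
          push_cast
          omega
        · rcases List.mem_map.mp h' with ⟨q, hq, rfl⟩
          obtain ⟨j, hj, hq2⟩ := hitems_mem q hq
          simp only [hq2]
          push_cast
          omega
      · have := List.length_dropWhile_le (fun q => decide (q.1 = r0.1)) rtail
        have hc : ((rtail.dropWhile (fun q => decide (q.1 = r0.1))).length : Int) ≤ (rtail.length : Int) := by exact_mod_cast this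
        omega
      · simpa [happ] using hA1len
      · have hle : (answer ++ r0.2 :: ((rtail.takeWhile (fun q => decide (q.1 = r0.1))).map Prod.snd)).length ≤ i + k := by
          rw [← happ]
          omega
        omega
      · simp only [List.length_append, List.length_cons]
        omega

-- ===== VERDICT (by name: the statement is the Claim_ definition above) =====
theorem solution_spec : Claim_equal_solution := by
  intro N ts _ hpre
  obtain ⟨hN, hne⟩ := hpre
  unfold Spec_solution solution solution_alt
  have hpos : 0 < ts.length := by
    cases ts with
    | nil => exact absurd rfl hne
    | cons a b => simp
  have h := loop_sim N ts hN (ts.length + 1) 0 [] [] 0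
    (Nat.zero_le _) List.Pairwise.nil (by simp) (by simp; omega) rfl
    (by simpa using hpos) (by omega)
  simpa [shiftL] using h
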